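-- pv_equiv track=rewrite | github.com/arsbw2802/Multimodal_Prediction | TDOST/TDOST/generate_embeddings_v1-1.py | get_milan_sensor_global_context
-- ===== SOURCE A (Python) =====
-- def get_milan_sensor_global_context(raw_sensor):
--     sensor_mapping = {
--         ("M001",): "near home entrance",
--         ("M002",): "near home entrance towards living room",
--         ("M003",): "in dining room",
--         ("M004",): "in living room",
--         ("M005",): "in living room near slider door",
--         ("M006",): "between living room and workspace / TV room",
--         ("M007",): "in workspace / TV room near desk",
--         ("M008",): "in workspace / TV room near corridor",
--         ("M009",): "in corridor near washer and dryer",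
--         ("M010",): "in corridor between dining room and kitchen",
--         ("M011",): "in corridor between kitchen and guest bathroom sink",
--         ("M012",): "between dining room and kitchen",
--         ("M013",): "in bathroom near sink",
--         ("M014",): "in kitchen near door",
--         ("M015",): "in kitchen near fridge",
--         ("M016",): "in kitchen near corridor",
--         ("M017",): "in guest bathroom sink",
--         ("M018",): "in toilet / shower",
--         ("M019",): "in corridor near workspace / TV room",
--         ("M020", "M021", "M028"): "in bedroom",
--         ("M022", "M023", "T001"): "in kitchen near stove",
--         ("M024",): "in guest bedroom",
--         ("M025",): "in walk-in closet",
--         ("M026",): "in workspace / TV room",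
--         ("M027",): "in living room",
--         ("T002",): "in corridor near guest bathroom sink",
--         ("D001",): "on home entrance door",
--         ("D002",): "on coat cabinet near home entrance door",
--         ("D003",): "in kitchen"
--     }
--
--     for sensor_codes, context in sensor_mapping.items():
--         if raw_sensor in sensor_codes:
--             return context
--
--     return None  # Or a default context if needed
-- ===== SOURCE B (Python) =====
-- # B: parse the sensor code (letter + 3-digit number) and index a per-letter
-- # list of context strings, instead of scanning a tuple-keyed dict.
-- _M_CONTEXTS = [
--     "near home entrance",                                   # M001
--     "near home entrance towards living room",               # M002
--     "in dining room",                                       # M003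
--     "in living room",                                       # M004
--     "in living room near slider door",                      # M005
--     "between living room and workspace / TV room",          # M006
--     "in workspace / TV room near desk",                     # M007
--     "in workspace / TV room near corridor",                 # M008
--     "in corridor near washer and dryer",                    # M009
--     "in corridor between dining room and kitchen",          # M010
--     "in corridor between kitchen and guest bathroom sink",  # M011
--     "between dining room and kitchen",                      # M012
--     "in bathroom near sink",                                # M013
--     "in kitchen near door",                                 # M014
--     "in kitchen near fridge",                               # M015
--     "in kitchen near corridor",                             # M016
--     "in guest bathroom sink",                               # M017
--     "in toilet / shower",                                   # M018
--     "in corridor near workspace / TV room",                 # M019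
--     "in bedroom",                                           # M020
--     "in bedroom",                                           # M021
--     "in kitchen near stove",                                # M022
--     "in kitchen near stove",                                # M023
--     "in guest bedroom",                                     # M024
--     "in walk-in closet",                                    # M025
--     "in workspace / TV room",                               # M026
--     "in living room",                                       # M027
--     "in bedroom",                                           # M028
-- ]
-- _T_CONTEXTS = [
--     "in kitchen near stove",                                # T001
--     "in corridor near guest bathroom sink",                 # T002
-- ]
-- _D_CONTEXTS = [
--     "on home entrance door",                                # D001
--     "on coat cabinet near home entrance door",              # D002
--     "in kitchen",                                           # D003
-- ]
--
-- def get_milan_sensor_global_context(raw_sensor):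
--     if len(raw_sensor) != 4:
--         return None
--     num = raw_sensor[1:]
--     if not num.isdigit():
--         return None
--     if raw_sensor[0] == "M":
--         table = _M_CONTEXTS
--     elif raw_sensor[0] == "T":
--         table = _T_CONTEXTS
--     elif raw_sensor[0] == "D":
--         table = _D_CONTEXTS
--     else:
--         return None
--     n = int(num)
--     if not 1 <= n <= len(table):
--         return None
--     return table[n - 1]
-- ===== Notes on version B (the rewrite author's own statement) =====
-- stated objective: alternative
-- what changed: Instead of scanning a tuple-keyed dict with membership tests, B parses the code as letter + 3-digit number and indexes a per-letter list of context strings.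
import Mathlib
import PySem

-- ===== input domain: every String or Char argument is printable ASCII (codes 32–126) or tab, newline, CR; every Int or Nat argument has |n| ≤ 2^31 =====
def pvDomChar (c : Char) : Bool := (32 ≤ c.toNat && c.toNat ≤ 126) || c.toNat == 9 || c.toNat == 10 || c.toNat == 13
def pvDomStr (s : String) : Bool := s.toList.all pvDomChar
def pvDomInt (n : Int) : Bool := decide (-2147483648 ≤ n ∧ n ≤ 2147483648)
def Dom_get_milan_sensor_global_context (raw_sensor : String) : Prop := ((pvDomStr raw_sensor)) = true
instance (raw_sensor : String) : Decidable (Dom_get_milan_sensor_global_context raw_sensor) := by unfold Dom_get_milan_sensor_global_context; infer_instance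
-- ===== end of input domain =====

-- B parses the sensor code (letter + 3-digit number) and indexes a per-letter list of
-- context strings, instead of scanning a tuple-keyed dict (alternative decomposition).

-- ===== PORT A =====
-- sensor_mapping: tuple keys become List String, insertion order as in A
def milanSensorMapping : List (List String × String) :=
  [(["M001"], "near home entrance"),
   (["M002"], "near home entrance towards living room"),
   (["M003"], "in dining room"),
   (["M004"], "in living room"),
   (["M005"], "in living room near slider door"),
   (["M006"], "between living room and workspace / TV room"),
   (["M007"], "in workspace / TV room near desk"),
   (["M008"], "in workspace / TV room near corridor"),
   (["M009"], "in corridor near washer and dryer"),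
   (["M010"], "in corridor between dining room and kitchen"),
   (["M011"], "in corridor between kitchen and guest bathroom sink"),
   (["M012"], "between dining room and kitchen"),
   (["M013"], "in bathroom near sink"),
   (["M014"], "in kitchen near door"),
   (["M015"], "in kitchen near fridge"),
   (["M016"], "in kitchen near corridor"),
   (["M017"], "in guest bathroom sink"),
   (["M018"], "in toilet / shower"),
   (["M019"], "in corridor near workspace / TV room"),
   (["M020", "M021", "M028"], "in bedroom"),
   (["M022", "M023", "T001"], "in kitchen near stove"),
   (["M024"], "in guest bedroom"),
   (["M025"], "in walk-in closet"),
   (["M026"], "in workspace / TV room"),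
   (["M027"], "in living room"),
   (["T002"], "in corridor near guest bathroom sink"),
   (["D001"], "on home entrance door"),
   (["D002"], "on coat cabinet near home entrance door"),
   (["D003"], "in kitchen")]

-- the loop: for sensor_codes, context in sensor_mapping.items(): if raw_sensor in sensor_codes: return context
def milanScan (raw_sensor : String) : List (List String × String) → Option String
  | [] => none
  | (sensor_codes, context) :: rest =>
      if raw_sensor ∈ sensor_codes then some context else milanScan raw_sensor rest

def get_milan_sensor_global_context (raw_sensor : String) : Option String :=
  milanScan raw_sensor milanSensorMapping

-- ===== PORT B =====
-- _M_CONTEXTS: context of M00k at index k-1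
def milanM : List String :=
  ["near home entrance",
   "near home entrance towards living room",
   "in dining room",
   "in living room",
   "in living room near slider door",
   "between living room and workspace / TV room",
   "in workspace / TV room near desk",
   "in workspace / TV room near corridor",
   "in corridor near washer and dryer",
   "in corridor between dining room and kitchen",
   "in corridor between kitchen and guest bathroom sink",
   "between dining room and kitchen",
   "in bathroom near sink",
   "in kitchen near door",
   "in kitchen near fridge",
   "in kitchen near corridor",
   "in guest bathroom sink",
   "in toilet / shower",
   "in corridor near workspace / TV room",
   "in bedroom",
   "in bedroom",
   "in kitchen near stove",
   "in kitchen near stove",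
   "in guest bedroom",
   "in walk-in closet",
   "in workspace / TV room",
   "in living room",
   "in bedroom"]

-- _T_CONTEXTS
def milanT : List String :=
  ["in kitchen near stove",
   "in corridor near guest bathroom sink"]

-- _D_CONTEXTS
def milanD : List String :=
  ["on home entrance door",
   "on coat cabinet near home entrance door",
   "in kitchen"]

-- Source B: length test, digit test on the numeric suffix, per-letter table, index n-1
def get_milan_sensor_global_context_alt (raw_sensor : String) : Option String :=
  if PySem.Str.len raw_sensor ≠ 4 then none
  else
    let num := PySem.Str.slice raw_sensor (some 1) none          -- raw_sensor[1:]
    if ¬ PySem.Str.strIsdigit num then none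
    else
      -- raw_sensor[0] as a Char (in range: length is 4); the if/elif chain picking `table`
      let table? : Option (List String) :=
        if PySem.Str.pyGet? raw_sensor 0 = some 'M' then some milanM
        else if PySem.Str.pyGet? raw_sensor 0 = some 'T' then some milanT
        else if PySem.Str.pyGet? raw_sensor 0 = some 'D' then some milanD
        else none
      match table? with
      | none => none
      | some table =>
        match PySem.Int.ofStr? num with                          -- n = int(num); always some: num is 3 digits
        | none => none
        | some n =>
          if ¬ (1 ≤ n ∧ n ≤ PySem.List.len table) then none      -- if not 1 <= n <= len(table)
          else some (PySem.List.pyGetD table (n - 1) "")         -- table[n-1], in range by the guard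

-- ===== PRECONDITION & SPEC =====
def Spec_get_milan_sensor_global_context (raw_sensor : String) (out : Option String) : Prop := out = get_milan_sensor_global_context_alt raw_sensor
instance (raw_sensor : String) (out : Option String) : Decidable (Spec_get_milan_sensor_global_context raw_sensor out) := by unfold Spec_get_milan_sensor_global_context; infer_instance

-- ===== CLAIM (what is proved, stated in full; the proofs are below) =====
def Claim_equal_get_milan_sensor_global_context : Prop := ∀ (raw_sensor : String), Dom_get_milan_sensor_global_context raw_sensor → Spec_get_milan_sensor_global_context raw_sensor (get_milan_sensor_global_context raw_sensor)

-- ===== LEMMAS AND PROOFS =====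
lemma char_eq_of_toNat_eq {c k : Char} (h : c.toNat = k.toNat) : c = k :=
  Char.ext (UInt32.toNat_inj.mp h)

lemma digit_bounds (c : Char) (h : PySem.Chars.isdigit c = true) :
    48 ≤ c.toNat ∧ c.toNat ≤ 57 := by
  simpa [PySem.Chars.isdigit, Char.le_def, UInt32.le_iff_toNat_le] using h

lemma digit_cases (c : Char) (h : PySem.Chars.isdigit c = true) :
    c = '0' ∨ c = '1' ∨ c = '2' ∨ c = '3' ∨ c = '4' ∨ c = '5' ∨ c = '6' ∨ c = '7' ∨ c = '8' ∨ c = '9' := by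
  obtain ⟨h48, h57⟩ := digit_bounds c h
  have : c.toNat = 48 ∨ c.toNat = 49 ∨ c.toNat = 50 ∨ c.toNat = 51 ∨ c.toNat = 52 ∨ c.toNat = 53 ∨ c.toNat = 54 ∨ c.toNat = 55 ∨ c.toNat = 56 ∨ c.toNat = 57 := by omega
  rcases this with h|h|h|h|h|h|h|h|h|h <;>
    first
      | exact .inl (char_eq_of_toNat_eq h)
      | exact .inr (.inl (char_eq_of_toNat_eq h))
      | exact .inr (.inr (.inl (char_eq_of_toNat_eq h)))
      | exact .inr (.inr (.inr (.inl (char_eq_of_toNat_eq h))))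
      | exact .inr (.inr (.inr (.inr (.inl (char_eq_of_toNat_eq h)))))
      | exact .inr (.inr (.inr (.inr (.inr (.inl (char_eq_of_toNat_eq h))))))
      | exact .inr (.inr (.inr (.inr (.inr (.inr (.inl (char_eq_of_toNat_eq h)))))))
      | exact .inr (.inr (.inr (.inr (.inr (.inr (.inr (.inl (char_eq_of_toNat_eq h))))))))
      | exact .inr (.inr (.inr (.inr (.inr (.inr (.inr (.inr (.inl (char_eq_of_toNat_eq h)))))))))
      | exact .inr (.inr (.inr (.inr (.inr (.inr (.inr (.inr (.inr (char_eq_of_toNat_eq h)))))))))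

def digitsL : List Char := ['0','1','2','3','4','5','6','7','8','9']

lemma digit_mem (c : Char) (h : PySem.Chars.isdigit c = true) : c ∈ digitsL := by
  rcases digit_cases c h with rfl|rfl|rfl|rfl|rfl|rfl|rfl|rfl|rfl|rfl <;> decide

set_option maxRecDepth 100000 in
set_option maxHeartbeats 2000000 in
lemma ofChars3_all : (digitsL.all fun b => digitsL.all fun c => digitsL.all fun d =>
    PySem.Int.ofChars? [b, c, d] == some (((100*b.toNat + 10*c.toNat + d.toNat : Nat) : Int) - 5328)) = true := by
  decide

lemma ofChars3 (b c d : Char) (hb : PySem.Chars.isdigit b = true)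
    (hc : PySem.Chars.isdigit c = true) (hd : PySem.Chars.isdigit d = true) :
    PySem.Int.ofChars? [b, c, d] = some (((100*b.toNat + 10*c.toNat + d.toNat : Nat) : Int) - 5328) := by
  have h1 := List.all_eq_true.mp ofChars3_all b (digit_mem b hb)
  have h2 := List.all_eq_true.mp h1 c (digit_mem c hc)
  have h3 := List.all_eq_true.mp h2 d (digit_mem d hd)
  exact beq_iff_eq.mp h3

lemma scan_none_of_pred (P : String → Bool) (gs : List (List String × String))
    (hall : gs.all (fun p => p.1.all P) = true) (s : String) (hs : P s = false) :
    milanScan s gs = none := by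
  induction gs with
  | nil => rfl
  | cons p rest ih =>
    obtain ⟨codes, ctx⟩ := p
    simp only [List.all_cons, Bool.and_eq_true] at hall
    have hnot : s ∉ codes := fun hmem => by
      have := List.all_eq_true.mp hall.1 s hmem
      rw [hs] at this; cases this
    simp [milanScan, hnot, ih hall.2]

-- B on a 4-char string with digit tail, reduced to the guarded table lookup
lemma alt_eval (a b c d : Char) (hb : PySem.Chars.isdigit b = true)
    (hc : PySem.Chars.isdigit c = true) (hd : PySem.Chars.isdigit d = true) :
    get_milan_sensor_global_context_alt (String.ofList [a,b,c,d]) =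
      (if a = 'M' then
        (if ¬ (1 ≤ (((100*b.toNat + 10*c.toNat + d.toNat : Nat) : Int) - 5328) ∧ (((100*b.toNat + 10*c.toNat + d.toNat : Nat) : Int) - 5328) ≤ 28) then none
         else some (PySem.List.pyGetD milanM ((((100*b.toNat + 10*c.toNat + d.toNat : Nat) : Int) - 5328) - 1) ""))
       else if a = 'T' then
        (if ¬ (1 ≤ (((100*b.toNat + 10*c.toNat + d.toNat : Nat) : Int) - 5328) ∧ (((100*b.toNat + 10*c.toNat + d.toNat : Nat) : Int) - 5328) ≤ 2) then none
         else some (PySem.List.pyGetD milanT ((((100*b.toNat + 10*c.toNat + d.toNat : Nat) : Int) - 5328) - 1) ""))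
       else if a = 'D' then
        (if ¬ (1 ≤ (((100*b.toNat + 10*c.toNat + d.toNat : Nat) : Int) - 5328) ∧ (((100*b.toNat + 10*c.toNat + d.toNat : Nat) : Int) - 5328) ≤ 3) then none
         else some (PySem.List.pyGetD milanD ((((100*b.toNat + 10*c.toNat + d.toNat : Nat) : Int) - 5328) - 1) ""))
       else none) := by
  have h1 : (PySem.Str.slice (String.ofList [a,b,c,d]) (some 1) none).toList = [b,c,d] := by
    simp [PySem.Str.toList_slice, PySem.List.slice_from_one]
  have hnum : PySem.Str.slice (String.ofList [a,b,c,d]) (some 1) none = String.ofList [b,c,d] := by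
    conv_lhs => rw [← String.ofList_toList (s := PySem.Str.slice (String.ofList [a,b,c,d]) (some 1) none)]
    rw [h1]
  unfold get_milan_sensor_global_context_alt
  rw [hnum]
  simp only [PySem.Str.len_eq, String.toList_ofList, List.length_cons, List.length_nil,
    PySem.Str.strIsdigit_eq, PySem.Chars.strIsdigit, List.all_cons, List.all_nil, hb, hc, hd,
    PySem.Int.ofStr?, ofChars3 b c d hb hc hd, PySem.List.len_eq]
  norm_num
  by_cases hM : a = 'M' <;> by_cases hT : a = 'T' <;> by_cases hD : a = 'D' <;>
    simp [hM, hT, hD, milanM, milanT, milanD]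

-- B returns none on strings that are not 4 characters long
lemma alt_badlen (s : String) (h : s.toList.length ≠ 4) :
    get_milan_sensor_global_context_alt s = none := by
  unfold get_milan_sensor_global_context_alt
  rw [if_pos (by simp [PySem.Str.len_eq]; exact_mod_cast h)]

-- B returns none when some of the last three characters is not a digit
lemma alt_nondigit (a b c d : Char)
    (h : (PySem.Chars.isdigit b && (PySem.Chars.isdigit c && PySem.Chars.isdigit d)) = false) :
    get_milan_sensor_global_context_alt (String.ofList [a,b,c,d]) = none := by
  have h1 : (PySem.Str.slice (String.ofList [a,b,c,d]) (some 1) none).toList = [b,c,d] := by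
    simp [PySem.Str.toList_slice, PySem.List.slice_from_one]
  unfold get_milan_sensor_global_context_alt
  rw [if_neg (by simp [PySem.Str.len_eq])]
  rw [if_pos (by simp [PySem.Str.strIsdigit_eq, h1, PySem.Chars.strIsdigit]; intro hb hc; simp_all)]

lemma toList4 {α : Type} (l : List α) (h : l.length = 4) : ∃ a b c d, l = [a, b, c, d] := by
  match l with
  | [a,b,c,d] => exact ⟨a,b,c,d,rfl⟩
  | [] | [_] | [_,_] | [_,_,_] => simp at h
  | _::_::_::_::_::t => simp at h

-- ===== VERDICT (by name: the statement is the Claim_ definition above) =====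
theorem get_milan_sensor_global_context_spec : Claim_equal_get_milan_sensor_global_context := by
  intro s _
  unfold Spec_get_milan_sensor_global_context
  by_cases hlen : s.toList.length = 4
  · obtain ⟨a, b, c, d, hl⟩ := toList4 s.toList hlen
    have hs : s = String.ofList [a,b,c,d] := by rw [← hl, String.ofList_toList]
    subst hs
    by_cases hdig : (PySem.Chars.isdigit b && (PySem.Chars.isdigit c && PySem.Chars.isdigit d)) = true
    · obtain ⟨hb, hc, hd⟩ : PySem.Chars.isdigit b = true ∧ PySem.Chars.isdigit c = true ∧ PySem.Chars.isdigit d = true := by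
        simpa using hdig
      obtain ⟨hb48, hb57⟩ := digit_bounds b hb
      obtain ⟨hc48, hc57⟩ := digit_bounds c hc
      obtain ⟨hd48, hd57⟩ := digit_bounds d hd
      rw [alt_eval a b c d hb hc hd]
      by_cases hM : a = 'M'
      · subst hM
        rw [if_pos rfl]
        by_cases hb0 : b = '0'
        · subst hb0
          rcases digit_cases c hc with rfl|rfl|rfl|rfl|rfl|rfl|rfl|rfl|rfl|rfl <;>
          rcases digit_cases d hd with rfl|rfl|rfl|rfl|rfl|rfl|rfl|rfl|rfl|rfl <;> decide
        · have hbne : b.toNat ≠ 48 := fun hh => hb0 (char_eq_of_toNat_eq hh)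
          rw [if_pos (by push_cast; omega)]
          exact scan_none_of_pred (fun k => k.toList[1]? == some '0') _ (by decide) _
            (by simp [hb0])
      · by_cases hT : a = 'T'
        · subst hT
          rw [if_neg (by decide), if_pos rfl]
          by_cases hb0 : b = '0'
          · subst hb0
            rcases digit_cases c hc with rfl|rfl|rfl|rfl|rfl|rfl|rfl|rfl|rfl|rfl <;>
            rcases digit_cases d hd with rfl|rfl|rfl|rfl|rfl|rfl|rfl|rfl|rfl|rfl <;> decide
          · have hbne : b.toNat ≠ 48 := fun hh => hb0 (char_eq_of_toNat_eq hh)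
            rw [if_pos (by push_cast; omega)]
            exact scan_none_of_pred (fun k => k.toList[1]? == some '0') _ (by decide) _
              (by simp [hb0])
        · by_cases hD : a = 'D'
          · subst hD
            rw [if_neg (by decide), if_neg (by decide), if_pos rfl]
            by_cases hb0 : b = '0'
            · subst hb0
              rcases digit_cases c hc with rfl|rfl|rfl|rfl|rfl|rfl|rfl|rfl|rfl|rfl <;>
              rcases digit_cases d hd with rfl|rfl|rfl|rfl|rfl|rfl|rfl|rfl|rfl|rfl <;> decide
            · have hbne : b.toNat ≠ 48 := fun hh => hb0 (char_eq_of_toNat_eq hh)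
              rw [if_pos (by push_cast; omega)]
              exact scan_none_of_pred (fun k => k.toList[1]? == some '0') _ (by decide) _
                (by simp [hb0])
          · rw [if_neg hM, if_neg hT, if_neg hD]
            exact scan_none_of_pred
              (fun k => (k.toList[0]? == some 'M') || (k.toList[0]? == some 'T') || (k.toList[0]? == some 'D'))
              _ (by decide) _ (by simp [hM, hT, hD])
    · rw [alt_nondigit a b c d (by simpa using hdig)]
      exact scan_none_of_pred (fun k => PySem.Chars.strIsdigit (k.toList.drop 1)) _ (by decide) _
        (by simp [PySem.Chars.strIsdigit]; intro hb hc; simp_all)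
  · rw [alt_badlen s hlen]
    exact scan_none_of_pred (fun k => k.toList.length == 4) _ (by decide) _ (beq_eq_false_iff_ne.mpr hlen)
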